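-- pv_equiv track=rewrite | github.com/OmniNode-ai/omnibase | legacy/script/validate/python/python_validate_dockerfile.py | parse_dockerfile
-- ===== SOURCE A (Python) =====
-- from typing import Any, Dict, List, Optional, Tuple
--
-- def parse_dockerfile(content: str) -> List[Tuple[str, str]]:
--     instructions = []
--     current_instruction = None
--     current_args = []
--     for line in content.split("\n"):
--         line = line.strip()
--         if not line or line.startswith("#"):
--             continue
--         if line.endswith("\\"):
--             if current_instruction is None:
--                 instruction, arg = line.split(None, 1)
--                 current_instruction = instruction
--                 current_args = [arg.rstrip("\\").strip()]
--             else: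
--                 current_args.append(line.rstrip("\\").strip())
--         else:
--             if current_instruction is not None:
--                 current_args.append(line)
--                 instructions.append((current_instruction, " ".join(current_args)))
--                 current_instruction = None
--                 current_args = []
--             else:
--                 instruction, arg = line.split(None, 1)
--                 instructions.append((instruction, arg))
--     return instructions
-- ===== SOURCE B (Python) =====
-- def parse_dockerfile(content):
--     lines = [s for s in (raw.strip() for raw in content.split("\n"))
--              if s and not s.startswith("#")]
--
--     def frag(s):
--         return s.rstrip("\\").strip()
--
--     out = []
--     while lines:
--         line = lines[0]
--         if line.endswith("\\"):
--             instruction, first = line.split(None, 1)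
--             k = 1
--             while k < len(lines) and lines[k].endswith("\\"):
--                 k += 1
--             if k == len(lines):
--                 break  # unterminated trailing continuation group is dropped
--             out.append((instruction,
--                         " ".join([frag(first)] + [frag(x) for x in lines[1:k]] + [lines[k]])))
--             lines = lines[k + 1:]
--         else:
--             instruction, arg = line.split(None, 1)
--             out.append((instruction, arg))
--             lines = lines[1:]
--     return out
-- ===== Notes on version B (the rewrite author's own statement) =====
-- stated objective: alternative
-- what changed: A's single pass with a three-field state machine (instructions, current_instruction, current_args) is replaced by two phases: first filter/strip the physical lines once, then recurse group by group, collecting each backslash-continuation run with a span and dropping an unterminated trailing run.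
import Mathlib
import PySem

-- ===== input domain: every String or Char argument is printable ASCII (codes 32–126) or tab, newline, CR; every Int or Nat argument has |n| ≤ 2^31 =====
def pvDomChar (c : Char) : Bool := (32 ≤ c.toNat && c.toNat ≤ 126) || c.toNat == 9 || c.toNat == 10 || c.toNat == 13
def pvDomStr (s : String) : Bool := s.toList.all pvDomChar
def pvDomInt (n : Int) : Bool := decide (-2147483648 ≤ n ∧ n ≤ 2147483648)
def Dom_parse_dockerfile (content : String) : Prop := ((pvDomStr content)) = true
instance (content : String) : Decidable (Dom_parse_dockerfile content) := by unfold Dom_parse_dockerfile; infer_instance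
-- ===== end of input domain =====

-- B rewrites A's one-pass three-field state machine as two phases: filter/strip the lines once,
-- then recurse group by group (a span over the trailing-backslash run); objective: alternative decomposition.

-- shared small primitives (both Pythons use the same expressions for them)
-- `s.rstrip("\\")`: drop trailing backslashes (hand port, exact: rstrip of a one-char set)
def pvRstripBS (s : List Char) : List Char := (s.reverse.dropWhile (· == '\\')).reverse

-- `instruction, arg = line.split(None, 1)`; the one-token case is a Python ValueError, excluded by Pre_
def pvSplit1 (s : List Char) : List Char × List Char :=
  match PySem.Chars.split₀Max s 1 with
  | [a, b] => (a, b)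
  | [a] => (a, [])
  | _ => ([], [])

-- ===== PORT A =====
-- A's loop body after the strip/skip prologue (state: instructions, current_instruction, current_args)
def pvABody (st : List (List Char × List Char) × Option (List Char) × List (List Char))
    (line : List Char) : List (List Char × List Char) × Option (List Char) × List (List Char) :=
  let (ins, cur, args) := st
  if PySem.Chars.endswith line ['\\'] then
    match cur with
    | none =>
        let p := pvSplit1 line
        (ins, some p.1, [PySem.Chars.strip (pvRstripBS p.2)])
    | some _ => (ins, cur, args ++ [PySem.Chars.strip (pvRstripBS line)])
  else
    match cur with
    | some i => (ins ++ [(i, PySem.Chars.join [' '] (args ++ [line]))], none, [])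
    | none => (ins ++ [pvSplit1 line], none, [])

def parse_dockerfile (content : String) : List (String × String) :=
  let st := (PySem.Chars.splitOn content.toList ['\n']).foldl
    (fun st raw =>
      let line := PySem.Chars.strip raw
      if line = [] || PySem.Chars.startswith line ['#'] then st else pvABody st line)
    ([], none, [])
  st.1.map (fun p => (String.ofList p.1, String.ofList p.2))

-- ===== PORT B =====
-- phase 1: strip every physical line, keep the non-empty non-comment ones
def pvLines (content : String) : List (List Char) :=
  (PySem.Chars.splitOn content.toList ['\n']).filterMap (fun raw =>
    let s := PySem.Chars.strip raw
    if s = [] || PySem.Chars.startswith s ['#'] then none else some s)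

-- `frag` of Source B
def pvFrag (s : List Char) : List Char := PySem.Chars.strip (pvRstripBS s)

-- phase 2: consume the filtered lines group by group (span over the backslash-terminated run)
def pvBGo : List (List Char) → List (List Char × List Char)
  | [] => []
  | l :: ls =>
    if PySem.Chars.endswith l ['\\'] then
      match h : (ls.span (fun x => PySem.Chars.endswith x ['\\'])).2 with
      | [] => []  -- unterminated trailing continuation group is dropped
      | t :: rest =>
          ((pvSplit1 l).1,
            PySem.Chars.join [' ']
              (pvFrag (pvSplit1 l).2
                :: (ls.span (fun x => PySem.Chars.endswith x ['\\'])).1.map pvFrag ++ [t]))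
            :: pvBGo rest
    else pvSplit1 l :: pvBGo ls
termination_by ls => ls.length
decreasing_by
  · have hsub : (ls.span (fun x => PySem.Chars.endswith x ['\\'])).2.Sublist ls := by
      simp only [List.span_eq_takeWhile_dropWhile]
      exact List.dropWhile_sublist _
    have := hsub.length_le
    simp only [h, List.length_cons] at this
    simp only [List.length_cons]; omega
  · simp

def parse_dockerfile_alt (content : String) : List (String × String) :=
  (pvBGo (pvLines content)).map (fun p => (String.ofList p.1, String.ofList p.2))

-- ===== PRECONDITION & SPEC =====
-- Pre_ excludes exactly the inputs on which A raises ValueError: a kept line that is split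
-- (a standalone line, or the first line of a continuation group) but has only one
-- whitespace-separated token, so `instruction, arg = line.split(None, 1)` fails to unpack.
def pvPreGo (inCont : Bool) : List (List Char) → Bool
  | [] => true
  | l :: ls =>
      (inCont || (PySem.Chars.split₀Max l 1).length == 2)
        && pvPreGo (PySem.Chars.endswith l ['\\']) ls

def Pre_parse_dockerfile (content : String) : Prop := pvPreGo false (pvLines content) = true
instance (content : String) : Decidable (Pre_parse_dockerfile content) := by
  unfold Pre_parse_dockerfile; infer_instance

def pvWitness_parse_dockerfile : String := "FROM alpine\n# c\nRUN apk \\\n  add \\\n  git\nCMD sh"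

def Spec_parse_dockerfile (content : String) (out : List (String × String)) : Prop := out = parse_dockerfile_alt content
instance (content : String) (out : List (String × String)) : Decidable (Spec_parse_dockerfile content out) := by unfold Spec_parse_dockerfile; infer_instance

-- ===== CLAIM (what is proved, stated in full; the proofs are below) =====
def Claim_equal_parse_dockerfile : Prop := ∀ (content : String), Dom_parse_dockerfile content → Pre_parse_dockerfile content → Spec_parse_dockerfile content (parse_dockerfile content)

-- ===== LEMMAS AND PROOFS =====

-- proof-side: A's in-continuation behaviour on the remaining filtered lines
def pvBCont (i : List Char) (args : List (List Char)) :
    List (List Char) → List (List Char × List Char)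
  | [] => []
  | l :: ls =>
    if PySem.Chars.endswith l ['\\'] then pvBCont i (args ++ [pvFrag l]) ls
    else (i, PySem.Chars.join [' '] (args ++ [l])) :: pvBGo ls

theorem pvBCont_span (ls : List (List Char)) : ∀ (i : List Char) (args : List (List Char)),
    pvBCont i args ls =
      match (ls.span (fun x => PySem.Chars.endswith x ['\\'])).2 with
      | [] => []
      | t :: rest =>
          (i, PySem.Chars.join [' ']
            (args ++ (ls.span (fun x => PySem.Chars.endswith x ['\\'])).1.map pvFrag ++ [t]))
            :: pvBGo rest := by
  induction ls with
  | nil => intro i args; simp [pvBCont, List.span_eq_takeWhile_dropWhile]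
  | cons l ls ih =>
    intro i args
    by_cases hew : PySem.Chars.endswith l ['\\']
    · simp only [pvBCont, hew, if_true, ih i (args ++ [pvFrag l]),
        List.span_eq_takeWhile_dropWhile, List.takeWhile_cons, List.dropWhile_cons, hew]
      cases hdw : ls.dropWhile (fun x => PySem.Chars.endswith x ['\\']) with
      | nil => rfl
      | cons t rest => simp
    · simp [pvBCont, hew, List.span_eq_takeWhile_dropWhile, List.dropWhile_cons]

theorem pvBGo_cons (l : List Char) (ls : List (List Char)) :
    pvBGo (l :: ls) =
      if PySem.Chars.endswith l ['\\'] then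
        pvBCont (pvSplit1 l).1 [pvFrag (pvSplit1 l).2] ls
      else pvSplit1 l :: pvBGo ls := by
  by_cases hew : PySem.Chars.endswith l ['\\']
  · rw [pvBGo, if_pos hew, if_pos hew, pvBCont_span]
    cases hdw : (List.span (fun x => PySem.Chars.endswith x ['\\']) ls).2 with
    | nil => rfl
    | cons t rest => simp
  · rw [pvBGo, if_neg hew, if_neg hew]

theorem pvFoldl_main (ls : List (List Char)) :
    ∀ (res : List (List Char × List Char)) (i : List Char) (args : List (List Char)),
      ((ls.foldl pvABody (res, none, [])).1 = res ++ pvBGo ls) ∧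
      ((ls.foldl pvABody (res, some i, args)).1 = res ++ pvBCont i args ls) := by
  induction ls with
  | nil => intro res i args; simp [pvBGo, pvBCont]
  | cons l ls ih =>
    intro res i args
    constructor
    · rw [pvBGo_cons]
      by_cases hew : PySem.Chars.endswith l ['\\']
      · simp only [List.foldl_cons, pvABody, hew, if_pos]
        exact (ih res (pvSplit1 l).1 [pvFrag (pvSplit1 l).2]).2
      · simp only [List.foldl_cons, pvABody, hew, if_false, Bool.false_eq_true]
        rw [(ih (res ++ [pvSplit1 l]) i args).1]
        simp
    · by_cases hew : PySem.Chars.endswith l ['\\']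
      · simp only [List.foldl_cons, pvABody, hew, if_true, pvBCont, pvFrag]
        exact (ih res i (args ++ [PySem.Chars.strip (pvRstripBS l)])).2
      · simp only [List.foldl_cons, pvABody, hew, if_false, Bool.false_eq_true, pvBCont]
        rw [(ih (res ++ [(i, PySem.Chars.join [' '] (args ++ [l]))]) i args).1]
        simp

theorem pvFoldl_filter (raws : List (List Char)) (st : List (List Char × List Char) × Option (List Char) × List (List Char)) :
    raws.foldl
      (fun st raw =>
        let line := PySem.Chars.strip raw
        if line = [] || PySem.Chars.startswith line ['#'] then st else pvABody st line) st
    = (raws.filterMap (fun raw =>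
        let s := PySem.Chars.strip raw
        if s = [] || PySem.Chars.startswith s ['#'] then none else some s)).foldl pvABody st := by
  induction raws generalizing st with
  | nil => rfl
  | cons r raws ih =>
    simp only [List.foldl_cons, List.filterMap_cons]
    by_cases hc : PySem.Chars.strip r = [] || PySem.Chars.startswith (PySem.Chars.strip r) ['#']
    · simp only [hc, if_true]
      exact ih st
    · simp only [hc, if_false, Bool.false_eq_true, List.foldl_cons]
      exact ih _

-- ===== VERDICT (by name: the statement is the Claim_ definition above) =====
theorem parse_dockerfile_spec : Claim_equal_parse_dockerfile := by
  intro content _ _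
  unfold Spec_parse_dockerfile parse_dockerfile parse_dockerfile_alt
  rw [pvFoldl_filter]
  have h := (pvFoldl_main (pvLines content) [] [] []).1
  simp only [List.nil_append] at h
  exact congrArg (List.map fun p => (String.ofList p.1, String.ofList p.2)) h
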